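-- pv_equiv track=rewrite | github.com/Lazybones3/tts-latex | handle_markdown.py | replace_symbol
-- ===== SOURCE A (Python) =====
-- def replace_symbol(text: str):
--     d = {
--         "\%": " percent",
--         "_": " sub ",
--         "=": " equals ",
--         "+": " plus ",
--         "-": " minus ",
--         "^": " to the "
--     }
--     for k, v in d.items():
--         # Percent symbols
--         text = text.replace(k, v)
--     return text
-- ===== SOURCE B (Python) =====
-- def replace_symbol(text: str):
--     # Alternative algorithm: one left-to-right pass with a lookup table instead of six sequential full-string replaces.
--     d = {
--         "_": " sub ",
--         "=": " equals ",
--         "+": " plus ",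
--         "-": " minus ",
--         "^": " to the "
--     }
--     out = []
--     i = 0
--     n = len(text)
--     while i < n:
--         if text.startswith("\\%", i):
--             out.append(" percent")
--             i += 2
--         else:
--             c = text[i]
--             out.append(d.get(c, c))
--             i += 1
--     return "".join(out)
-- ===== Notes on version B (the rewrite author's own statement) =====
-- stated objective: alternative
-- what changed: Six sequential full-string str.replace passes are replaced by a single left-to-right scan that checks for the backslash-percent token and otherwise substitutes each character through one dict lookup; it trades CPython's C-level replace loops for one pure-Python pass.
import Mathlib
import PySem

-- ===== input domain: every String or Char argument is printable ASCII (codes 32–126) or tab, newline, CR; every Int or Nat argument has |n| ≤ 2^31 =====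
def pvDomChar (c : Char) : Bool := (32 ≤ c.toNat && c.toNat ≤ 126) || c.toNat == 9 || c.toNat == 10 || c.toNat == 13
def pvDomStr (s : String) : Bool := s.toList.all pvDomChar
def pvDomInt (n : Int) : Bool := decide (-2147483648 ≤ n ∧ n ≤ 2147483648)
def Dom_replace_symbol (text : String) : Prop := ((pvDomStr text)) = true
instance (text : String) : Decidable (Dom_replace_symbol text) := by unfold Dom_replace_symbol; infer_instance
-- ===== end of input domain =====

-- B makes one left-to-right scan with a per-character lookup table instead of A's six sequential full-string replaces (alternative single-pass algorithm).

-- ===== PORT A =====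
-- literal port of A: build the dict, then fold over its items applying str.replace
def replace_symbol (text : String) : String :=
  let d : PySem.Dict String String :=
    (((((PySem.Dict.empty.insert "\\%" " percent").insert "_" " sub ").insert
        "=" " equals ").insert "+" " plus ").insert "-" " minus ").insert "^" " to the "
  d.items.foldl (fun t kv => PySem.Str.replace t kv.1 kv.2) text

-- ===== PORT B =====
-- per-character substitution table (Source B's d.get(c, c))
def subChar (c : Char) : List Char :=
  if c = '_' then " sub ".toList
  else if c = '=' then " equals ".toList
  else if c = '+' then " plus ".toList
  else if c = '-' then " minus ".toList
  else if c = '^' then " to the ".toList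
  else [c]

-- Source B's while loop: startswith "\%" check (advance by 2), else one-char lookup (advance by 1)
def scanB : List Char → List Char
  | [] => []
  | [c] => subChar c
  | c :: c2 :: t =>
    if c = '\\' ∧ c2 = '%' then " percent".toList ++ scanB t
    else subChar c ++ scanB (c2 :: t)

def replace_symbol_alt (text : String) : String := String.ofList (scanB text.toList)

-- ===== PRECONDITION & SPEC =====
def Spec_replace_symbol (text : String) (out : String) : Prop := out = replace_symbol_alt text
instance (text : String) (out : String) : Decidable (Spec_replace_symbol text out) := by unfold Spec_replace_symbol; infer_instance

-- ===== CLAIM (what is proved, stated in full; the proofs are below) =====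
def Claim_equal_replace_symbol : Prop := ∀ (text : String), Dom_replace_symbol text → Spec_replace_symbol text (replace_symbol text)

-- ===== LEMMAS AND PROOFS =====

-- the effect of A's first replace (the two-char pattern "\%") on a char list
def scan1 : List Char → List Char
  | [] => []
  | [c] => [c]
  | c :: c2 :: t =>
    if c = '\\' ∧ c2 = '%' then " percent".toList ++ scan1 t
    else c :: scan1 (c2 :: t)

-- a single-character replace is a flatMap
def fm (k : Char) (v : List Char) (l : List Char) : List Char :=
  l.flatMap (fun c => if c = k then v else [c])

theorem go_single (k : Char) (v : List Char) :
    ∀ (fuel : Nat) (l acc : List Char), l.length ≤ fuel →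
      PySem.Chars.replace.go [k] v fuel l acc = acc.reverse ++ fm k v l := by
  intro fuel
  induction fuel with
  | zero =>
    intro l acc h
    have : l = [] := by cases l <;> simp_all
    subst this; simp [PySem.Chars.replace.go, fm]
  | succ n ih =>
    intro l acc h
    cases l with
    | nil => simp [PySem.Chars.replace.go, fm]
    | cons c t =>
      rw [PySem.Chars.replace.go]
      have ht : t.length ≤ n := by simpa using h
      by_cases hc : c = k
      · subst hc
        simp only [List.isPrefixOf, beq_self_eq_true, Bool.true_and, if_true, List.length_cons,
          List.length_nil, List.drop_succ_cons, List.drop_zero]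
        rw [ih t _ ht]
        simp [fm]
      · have hb : ([k].isPrefixOf (c :: t)) = false := by
          simp [List.isPrefixOf]; exact fun h' => hc h'.symm
        rw [hb]
        simp only [Bool.false_eq_true, if_false]
        rw [ih t _ ht]
        simp [fm, hc]

theorem replace_single (k : Char) (v l : List Char) :
    PySem.Chars.replace l [k] v = fm k v l := by
  rw [PySem.Chars.replace]
  simp only [List.isEmpty_cons, Bool.false_eq_true, if_false]
  rw [go_single k v l.length l [] le_rfl]
  simp

theorem go_pct :
    ∀ (fuel : Nat) (l acc : List Char), l.length ≤ fuel →
      PySem.Chars.replace.go ['\\', '%'] " percent".toList fuel l acc =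
        acc.reverse ++ scan1 l := by
  intro fuel
  induction fuel with
  | zero =>
    intro l acc h
    have : l = [] := by cases l <;> simp_all
    subst this; simp [PySem.Chars.replace.go, scan1]
  | succ n ih =>
    intro l acc h
    match l with
    | [] => simp [PySem.Chars.replace.go, scan1]
    | [c] =>
      have hb : (['\\', '%'].isPrefixOf [c]) = false := by simp [List.isPrefixOf]
      rw [PySem.Chars.replace.go, hb]
      simp only [Bool.false_eq_true, if_false]
      rw [ih [] _ (by simp)]
      simp [scan1]
    | c :: c2 :: t =>
      have ht : (c2 :: t).length ≤ n := by simpa using h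
      have ht2 : t.length ≤ n := by simp at ht ⊢; omega
      rw [PySem.Chars.replace.go]
      by_cases hc : c = '\\' ∧ c2 = '%'
      · obtain ⟨h1, h2⟩ := hc; subst h1; subst h2
        simp only [List.isPrefixOf, beq_self_eq_true, Bool.true_and, if_true, List.length_cons,
          List.length_nil, List.drop_succ_cons, List.drop_zero]
        rw [ih t _ ht2]
        simp [scan1]
      · have hb : (['\\', '%'].isPrefixOf (c :: c2 :: t)) = false := by
          simp [List.isPrefixOf]
          intro h1 h2; exact hc ⟨h1.symm, h2.symm⟩
        rw [hb]
        simp only [Bool.false_eq_true, if_false]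
        rw [ih (c2 :: t) _ ht]
        simp [scan1, hc]

theorem replace_pct (l : List Char) :
    PySem.Chars.replace l ['\\', '%'] " percent".toList = scan1 l := by
  rw [PySem.Chars.replace]
  simp only [List.isEmpty_cons, Bool.false_eq_true, if_false]
  rw [go_pct l.length l [] le_rfl]
  simp

theorem fm_append (k : Char) (v a b : List Char) :
    fm k v (a ++ b) = fm k v a ++ fm k v b := by
  simp [fm]

theorem chain_single (c : Char) :
    fm '^' " to the ".toList (fm '-' " minus ".toList (fm '+' " plus ".toList
      (fm '=' " equals ".toList (fm '_' " sub ".toList [c])))) = subChar c := by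
  by_cases h1 : c = '_'
  · subst h1; decide
  by_cases h2 : c = '='
  · subst h2; decide
  by_cases h3 : c = '+'
  · subst h3; decide
  by_cases h4 : c = '-'
  · subst h4; decide
  by_cases h5 : c = '^'
  · subst h5; decide
  simp [fm, subChar, h1, h2, h3, h4, h5]

theorem chain_pct :
    fm '^' " to the ".toList (fm '-' " minus ".toList (fm '+' " plus ".toList
      (fm '=' " equals ".toList (fm '_' " sub ".toList " percent".toList)))) =
      " percent".toList := by decide

theorem chain_scan1 (l : List Char) :
    fm '^' " to the ".toList (fm '-' " minus ".toList (fm '+' " plus ".toList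
      (fm '=' " equals ".toList (fm '_' " sub ".toList (scan1 l))))) = scanB l := by
  induction l using scan1.induct with
  | case1 => decide
  | case2 c => rw [scan1, scanB]; exact chain_single c
  | case3 c c2 t h ih =>
    rw [scan1, scanB, if_pos h, if_pos h]
    simp only [fm_append, chain_pct, ih]
  | case4 c c2 t h ih =>
    rw [scan1, scanB, if_neg h, if_neg h]
    have hcons : (c :: scan1 (c2 :: t)) = [c] ++ scan1 (c2 :: t) := rfl
    rw [hcons]
    simp only [fm_append, chain_single, ih]

-- ===== VERDICT (by name: the statement is the Claim_ definition above) =====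
theorem replace_symbol_spec : Claim_equal_replace_symbol := by
  intro text _
  show replace_symbol text = replace_symbol_alt text
  have hA : replace_symbol text =
      PySem.Str.replace (PySem.Str.replace (PySem.Str.replace (PySem.Str.replace
        (PySem.Str.replace (PySem.Str.replace text "\\%" " percent") "_" " sub ")
        "=" " equals ") "+" " plus ") "-" " minus ") "^" " to the " := rfl
  rw [hA]
  show String.ofList (PySem.Chars.replace (String.ofList (PySem.Chars.replace
    (String.ofList (PySem.Chars.replace (String.ofList (PySem.Chars.replace
    (String.ofList (PySem.Chars.replace (String.ofList (PySem.Chars.replace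
    text.toList ['\\', '%'] " percent".toList)).toList ['_'] " sub ".toList)).toList
    ['='] " equals ".toList)).toList ['+'] " plus ".toList)).toList
    ['-'] " minus ".toList)).toList ['^'] " to the ".toList) = replace_symbol_alt text
  simp only [String.toList_ofList, replace_pct, replace_single]
  rw [chain_scan1]
  rfl
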